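-- pv_equiv track=rewrite | github.com/JanaLasser/agent_based_COVID_SEIRX | src/scseirx/construct_school_network.py | get_age_distribution
-- ===== SOURCE A (Python) =====
-- def get_age_bracket(school_type):
-- 	"""Return the age structure for different school types."""
-- 	age_brackets = {
-- 		'primary':[6, 7, 8, 9],
-- 		'primary_dc':[6, 7, 8, 9],
-- 		'lower_secondary':[10, 11, 12, 13],
-- 		'lower_secondary_dc':[10, 11, 12, 13],
-- 		'upper_secondary':[14, 15, 16, 17],
-- 		'secondary':[10, 11, 12, 13, 14, 15, 16, 17],
-- 		'secondary_dc':[10, 11, 12, 13, 14, 15, 16, 17]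
-- 	}
-- 	return age_brackets[school_type]
--
-- def get_age_distribution(school_type, N_classes):
-- 	"""
-- 	Given a school type (that sets the age-range of the students in the school),
-- 	distribute the available age-brackets evenly over the number of classes.
-- 	Note: the number of classes needs to be >= the number of different ages
-- 	that are taught in the given school type, such that every age is at least
-- 	taught in one class.
--
-- 	Parameters
-- 	----------
-- 	school_type : str
-- 		Type of the school. Needs to be a type supported by the function
-- 		get_age_bracket().
-- 	N_classes : int
-- 		Number of classes in the school.
--
-- 	Returns
-- 	-------
-- 	age_bracket_map_inv : dict
-- 		Dictionary of the form {class:age}.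
-- 	"""
-- 	age_bracket = get_age_bracket(school_type)
-- 	classes = list(range(1, N_classes + 1))
-- 	N_age_bracket = len(age_bracket)
-- 	classes_per_age_bracket = int(N_classes / N_age_bracket)
--
-- 	assert N_age_bracket <= N_classes, \
-- 	'not enough classes to accommodate all age brackets in this school type!'
--
-- 	age_bracket_map = {i:[] for i in age_bracket}
--
-- 	# easiest case: the number of classes is divisible by the number of floors
-- 	if N_classes % N_age_bracket == 0:
-- 		for i, age_bracket in enumerate(age_bracket):
-- 			age_bracket_map[age_bracket] = classes[i * classes_per_age_bracket:\
-- 					   i * classes_per_age_bracket + classes_per_age_bracket]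
--
-- 	# if there are leftover classes: assign them one-by-one to the existing
-- 	# age brackets, starting with the lowest
-- 	else:
-- 		leftover_classes = N_classes % N_age_bracket
-- 		classes_per_age_bracket += 1
-- 		for i, age_bracket in enumerate(age_bracket):
-- 			if i < leftover_classes:
-- 				age_bracket_map[age_bracket] = \
-- 						classes[i * classes_per_age_bracket: \
-- 						i * classes_per_age_bracket + classes_per_age_bracket]
-- 			# hooray, index magic!
-- 			else:
-- 				age_bracket_map[age_bracket] = \
-- 					classes[leftover_classes * classes_per_age_bracket + \
-- 					  (i - leftover_classes) * (classes_per_age_bracket - 1):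
-- 					leftover_classes * (classes_per_age_bracket) + \
-- 					  (i - leftover_classes) * (classes_per_age_bracket - 1) + \
-- 					  classes_per_age_bracket - 1]
--
-- 	# invert dict for easier use
-- 	age_bracket_map_inv = {}
-- 	for age_bracket, classes in age_bracket_map.items():
-- 		for c in classes:
-- 			age_bracket_map_inv.update({c:age_bracket})
--
-- 	return age_bracket_map_inv
-- ===== SOURCE B (Python) =====
-- def get_age_bracket(school_type):
--     """Return the age structure for different school types."""
--     age_brackets = {
--         'primary':[6, 7, 8, 9],
--         'primary_dc':[6, 7, 8, 9],
--         'lower_secondary':[10, 11, 12, 13],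
--         'lower_secondary_dc':[10, 11, 12, 13],
--         'upper_secondary':[14, 15, 16, 17],
--         'secondary':[10, 11, 12, 13, 14, 15, 16, 17],
--         'secondary_dc':[10, 11, 12, 13, 14, 15, 16, 17]
--     }
--     return age_brackets[school_type]
--
-- def get_age_distribution(school_type, N_classes):
--     """Distribute classes evenly over the school type's age bracket: {class: age}."""
--     ages = get_age_bracket(school_type)
--     base, leftover = divmod(N_classes, len(ages))
--     assert len(ages) <= N_classes, \
--     'not enough classes to accommodate all age brackets in this school type!'
--     inv = {}
--     c = 1
--     for i, age in enumerate(ages):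
--         for _ in range(base + (1 if i < leftover else 0)):
--             inv[c] = age
--             c += 1
--     return inv
-- ===== Notes on version B (the rewrite author's own statement) =====
-- stated objective: simpler
-- what changed: Replaces the forward age->classes map built with two slice-arithmetic branches plus a separate inversion loop by a single pass that computes divmod(N_classes, len(ages)) and assigns consecutive class numbers directly into the inverse {class: age} dict with a running counter.
import Mathlib
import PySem

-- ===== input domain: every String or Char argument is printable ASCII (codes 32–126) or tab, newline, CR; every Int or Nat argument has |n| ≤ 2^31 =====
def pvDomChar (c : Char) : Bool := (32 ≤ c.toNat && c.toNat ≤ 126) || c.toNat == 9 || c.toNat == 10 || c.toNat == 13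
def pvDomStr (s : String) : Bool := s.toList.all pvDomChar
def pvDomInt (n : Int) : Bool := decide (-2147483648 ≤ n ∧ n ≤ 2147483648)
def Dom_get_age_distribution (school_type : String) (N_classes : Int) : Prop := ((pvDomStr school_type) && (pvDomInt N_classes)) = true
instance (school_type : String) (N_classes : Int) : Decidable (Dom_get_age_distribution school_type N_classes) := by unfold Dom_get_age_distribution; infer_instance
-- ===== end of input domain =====

-- B replaces A's slice-arithmetic forward map + inversion loop by one divmod-based pass
-- building the inverse {class: age} dict directly with a running counter (objective: simpler).


-- ===== PORT A =====
def pyAgeBrackets : PySem.Dict String (List Int) :=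
  PySem.Dict.ofList
    [("primary", [6, 7, 8, 9]),
     ("primary_dc", [6, 7, 8, 9]),
     ("lower_secondary", [10, 11, 12, 13]),
     ("lower_secondary_dc", [10, 11, 12, 13]),
     ("upper_secondary", [14, 15, 16, 17]),
     ("secondary", [10, 11, 12, 13, 14, 15, 16, 17]),
     ("secondary_dc", [10, 11, 12, 13, 14, 15, 16, 17])]

-- age_brackets[school_type] : KeyError = none
def get_age_bracket (school_type : String) : Option (List Int) :=
  pyAgeBrackets.get? school_type

def get_age_distribution (school_type : String) (N_classes : Int) : List (Int × Int) :=
  match get_age_bracket school_type with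
  | none => []  -- KeyError: outside Pre_
  | some age_bracket =>
    let classes := PySem.List.pyRange 1 (N_classes + 1) 1
    let N_age_bracket : Int := age_bracket.length
    -- int(N_classes / N_age_bracket): exact as truncdiv since |N_classes| ≤ 2^31, divisor 4 or 8
    let classes_per_age_bracket := PySem.Int.truncdiv N_classes N_age_bracket
    if N_age_bracket ≤ N_classes then
      let age_bracket_map : PySem.Dict Int (List Int) :=
        age_bracket.foldl (fun d i => d.insert i []) PySem.Dict.empty
      let m : PySem.Dict Int (List Int) :=
        if PySem.Int.mod N_classes N_age_bracket = 0 then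
          (PySem.List.enumerate age_bracket 0).foldl
            (fun d p => d.insert p.2 (PySem.List.slice classes
                (some (p.1 * classes_per_age_bracket))
                (some (p.1 * classes_per_age_bracket + classes_per_age_bracket)))) age_bracket_map
        else
          let leftover_classes := PySem.Int.mod N_classes N_age_bracket
          let cpb := classes_per_age_bracket + 1
          (PySem.List.enumerate age_bracket 0).foldl
            (fun d p =>
              if p.1 < leftover_classes then
                d.insert p.2 (PySem.List.slice classes (some (p.1 * cpb)) (some (p.1 * cpb + cpb)))
              else
                d.insert p.2 (PySem.List.slice classes
                  (some (leftover_classes * cpb + (p.1 - leftover_classes) * (cpb - 1)))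
                  (some (leftover_classes * cpb + (p.1 - leftover_classes) * (cpb - 1) + cpb - 1))))
            age_bracket_map
      (m.items.foldl
        (fun inv pr => pr.2.foldl (fun i2 c => i2.insert c pr.1) inv)
        (PySem.Dict.empty : PySem.Dict Int Int)).items
    else []  -- AssertionError: outside Pre_

-- ===== PORT B =====
-- Source B carries the same get_age_bracket helper verbatim; the Lean port shares it.
def get_age_distribution_alt (school_type : String) (N_classes : Int) : List (Int × Int) :=
  match get_age_bracket school_type with
  | none => []  -- KeyError: outside Pre_
  | some ages =>
    let base := PySem.Int.floordiv N_classes ages.length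
    let leftover := PySem.Int.mod N_classes ages.length
    if (ages.length : Int) ≤ N_classes then
      ((PySem.List.enumerate ages 0).foldl
        (fun (st : PySem.Dict Int Int × Int) p =>
          (PySem.List.pyRange 0 (base + if p.1 < leftover then 1 else 0) 1).foldl
            (fun st2 _ => (st2.1.insert st2.2 p.2, st2.2 + 1)) st)
        (PySem.Dict.empty, 1)).1.items
    else []  -- AssertionError: outside Pre_

-- ===== PRECONDITION & SPEC =====
-- Pre_ excludes exactly the inputs where A raises: unknown school types (KeyError) and
-- N_classes below the size of the age bracket (AssertionError).
def Pre_get_age_distribution (school_type : String) (N_classes : Int) : Prop :=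
  (school_type ∈ ["primary", "primary_dc", "lower_secondary", "lower_secondary_dc",
                  "upper_secondary"] ∧ 4 ≤ N_classes)
  ∨ (school_type ∈ ["secondary", "secondary_dc"] ∧ 8 ≤ N_classes)
instance (school_type : String) (N_classes : Int) : Decidable (Pre_get_age_distribution school_type N_classes) := by unfold Pre_get_age_distribution; infer_instance

def pvWitness_get_age_distribution : String × Int := ("primary", 5)

def Spec_get_age_distribution (school_type : String) (N_classes : Int) (out : List (Int × Int)) : Prop := out = get_age_distribution_alt school_type N_classes
instance (school_type : String) (N_classes : Int) (out : List (Int × Int)) : Decidable (Spec_get_age_distribution school_type N_classes out) := by unfold Spec_get_age_distribution; infer_instance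

-- ===== CLAIM (what is proved, stated in full; the proofs are below) =====
def Claim_equal_get_age_distribution : Prop := ∀ (school_type : String) (N_classes : Int), Dom_get_age_distribution school_type N_classes → Pre_get_age_distribution school_type N_classes → Spec_get_age_distribution school_type N_classes (get_age_distribution school_type N_classes)


-- ===== LEMMAS AND PROOFS =====

-- start offset of age-bracket index i in A's class assignment (q = base, r = leftover)
def startA (q r i : Int) : Int := if i < r then i * (q + 1) else r * (q + 1) + (i - r) * q
-- number of classes assigned to index i
def cntA (q r i : Int) : Int := q + (if i < r then 1 else 0)

-- the pair segments B's counter loop produces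
def invSegs (cnt : Int → Int) : List Int → Int → Int → List (Int × Int)
  | [], _, _ => []
  | a :: t, s, c =>
      (PySem.List.pyRange c (c + cnt s) 1).map (fun x => (x, a)) ++ invSegs cnt t (s + 1) (c + cnt s)

lemma slice_classes (N lo hi : Int) (h0 : 0 ≤ lo) (hlh : lo ≤ hi) (hhN : hi ≤ N) :
    PySem.List.slice (PySem.List.pyRange 1 (N + 1) 1) (some lo) (some hi)
      = PySem.List.pyRange (1 + lo) (1 + hi) 1 := by
  rw [PySem.List.slice_toNat _ h0 (le_trans h0 hlh)]
  apply List.ext_getElem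
  · simp [PySem.List.length_pyRange_one]
    omega
  · intro k h1 h2
    simp [PySem.List.getElem_pyRange_one]
    omega

lemma fwd_aux (f : Int → List Int) (rest : List Int) :
    ∀ (s : Int) (done : List (Int × List Int)) (d : PySem.Dict Int (List Int)),
      d.items = done ++ rest.map (fun a => (a, ([] : List Int))) → d.keys.Nodup →
      ((PySem.List.enumerate rest s).foldl (fun d p => d.insert p.2 (f p.1)) d).items
        = done ++ (PySem.List.enumerate rest s).map (fun p => (p.2, f p.1)) := by
  induction rest with
  | nil =>
    intro s done d hitems hnd
    simpa [PySem.List.enumerate_nil] using hitems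
  | cons a t ih =>
    intro s done d hitems hnd
    rw [PySem.List.enumerate_cons]
    simp only [List.foldl_cons, List.map_cons]
    have hkeys : d.keys = done.map Prod.fst ++ a :: t := by
      simp only [PySem.Dict.keys, hitems]
      simp [Function.comp_def]
    rw [hkeys] at hnd
    obtain ⟨h1, h2, hdisj⟩ := List.nodup_append.mp hnd
    have hadone : a ∉ done.map Prod.fst := fun hmem => hdisj a hmem a (by simp) rfl
    have hat : a ∉ t := (List.nodup_cons.mp h2).1
    have hc : d.contains a = true := by
      rw [PySem.Dict.contains_eq_decide_mem_keys, hkeys]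
      simp
    have hdone : done.map (fun p => if (p.1 == a) = true then (a, f s) else p) = done := by
      conv_rhs => rw [← List.map_id done]
      apply List.map_congr_left
      intro p hp
      have hne : p.1 ≠ a := fun h => hadone (h ▸ List.mem_map_of_mem hp)
      simp [hne]
    have ht : ∀ x ∈ t, ((fun p => if (p.1 == a) = true then (a, f s) else p) ∘
        (fun x => (x, ([] : List Int)))) x = (x, ([] : List Int)) := by
      intro x hx
      have hne : x ≠ a := fun h => hat (h ▸ hx)
      simp [hne]
    have hitems1 : (d.insert a (f s)).items
        = (done ++ [(a, f s)]) ++ t.map (fun x => (x, ([] : List Int))) := by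
      rw [PySem.Dict.items_insert_of_contains _ _ hc, hitems]
      simp only [List.map_cons, List.map_append, List.map_map]
      rw [hdone, List.map_congr_left ht]
      simp
    have hnd1 : (d.insert a (f s)).keys.Nodup := by
      rw [PySem.Dict.keys_insert_of_contains _ _ hc, hkeys]
      exact hnd
    rw [ih (s + 1) (done ++ [(a, f s)]) _ hitems1 hnd1]
    simp

lemma fwd (ages : List Int) (hnd : ages.Nodup) (f : Int → List Int) :
    ((PySem.List.enumerate ages 0).foldl (fun d p => d.insert p.2 (f p.1))
        (ages.foldl (fun d i => d.insert i ([] : List Int)) PySem.Dict.empty)).items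
      = (PySem.List.enumerate ages 0).map (fun p => (p.2, f p.1)) := by
  have h0 := PySem.Dict.items_foldl_insert_fresh ages (fun a => a) (fun _ => ([] : List Int))
      PySem.Dict.empty (by simp) (by simpa using hnd)
  have hnd0 : (ages.foldl (fun d i => d.insert i ([] : List Int)) PySem.Dict.empty).keys.Nodup :=
    PySem.Dict.nodup_keys_foldl_insert ages (fun _ _ => ([] : List Int)) PySem.Dict.empty
      PySem.Dict.nodup_keys_empty
  exact fwd_aux f ages 0 [] _ (by simpa using h0) hnd0

lemma inv_fold (segs : List (Int × List Int)) :
    ∀ (d : PySem.Dict Int Int), d.keys.Nodup →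
      (∀ c, c ∈ segs.flatMap (·.2) → d.contains c = false) →
      (segs.flatMap (·.2)).Nodup →
      (segs.foldl (fun inv pr => pr.2.foldl (fun i2 c => i2.insert c pr.1) inv) d).items
        = d.items ++ segs.flatMap (fun pr => pr.2.map (fun c => (c, pr.1))) := by
  induction segs with
  | nil => intro d _ _ _; simp
  | cons pr t ih =>
    obtain ⟨a, cs⟩ := pr
    intro d hnd hfresh hflat
    simp only [List.foldl_cons, List.flatMap_cons] at hfresh hflat ⊢
    obtain ⟨hcs_nd, hrest_nd, hdisj⟩ := List.nodup_append.mp hflat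
    have hfresh_cs : ∀ c ∈ cs, d.contains c = false := fun c hc =>
      hfresh c (List.mem_append_left _ hc)
    have hinner := PySem.Dict.items_foldl_insert_fresh cs (fun c => c) (fun _ => a) d
      hfresh_cs (by simpa using hcs_nd)
    have hd'keys : (cs.foldl (fun i2 c => i2.insert c a) d).keys = d.keys ++ cs := by
      simp only [PySem.Dict.keys] at *
      rw [hinner]
      simp [Function.comp_def]
    have hnd' : (cs.foldl (fun i2 c => i2.insert c a) d).keys.Nodup := by
      rw [hd'keys]
      refine List.nodup_append.mpr ⟨hnd, hcs_nd, ?_⟩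
      intro x hx y hy hxy
      subst hxy
      have := hfresh_cs x hy
      rw [PySem.Dict.contains_eq_decide_mem_keys] at this
      simp at this
      exact this hx
    have hfresh' : ∀ c, c ∈ t.flatMap (·.2) → (cs.foldl (fun i2 c => i2.insert c a) d).contains c = false := by
      intro c hcmem
      rw [PySem.Dict.contains_eq_decide_mem_keys, hd'keys]
      have h1 : c ∉ d.keys := by
        have := hfresh c (List.mem_append_right _ hcmem)
        rw [PySem.Dict.contains_eq_decide_mem_keys] at this
        simpa using this
      have h2 : c ∉ cs := fun hcc => hdisj c hcc c hcmem rfl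
      simp [h1, h2]
    rw [ih _ hnd' hfresh' hrest_nd, hinner]
    simp

lemma b_seg (a : Int) (n : Nat) :
    ∀ (c : Int) (d : PySem.Dict Int Int), (∀ x ∈ d.keys, x < c) →
      (PySem.List.pyRange 0 (n : Int) 1).foldl
          (fun st2 _ => (st2.1.insert st2.2 a, st2.2 + 1)) (d, c)
        = (PySem.Dict.mk (d.items ++ (PySem.List.pyRange c (c + n) 1).map (fun x => (x, a))), c + n) := by
  induction n with
  | zero =>
    intro c d hk
    rw [show ((0 : Nat) : Int) = 0 from rfl]
    rw [PySem.List.pyRange_one_eq_nil le_rfl, PySem.List.pyRange_one_eq_nil (by omega)]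
    simp
  | succ n ih =>
    intro c d hk
    have hcast : ((n + 1 : Nat) : Int) = (n : Int) + 1 := by push_cast; ring
    rw [hcast, PySem.List.pyRange_one_succ_right (by positivity), List.foldl_append]
    rw [ih c d hk]
    simp only [List.foldl_cons, List.foldl_nil]
    have hnc : (PySem.Dict.mk (d.items ++
        (PySem.List.pyRange c (c + n) 1).map (fun x => (x, a)))).contains (c + n) = false := by
      rw [PySem.Dict.contains_eq_decide_mem_keys]
      simp only [PySem.Dict.keys_mk, List.map_append, List.map_map, decide_eq_false_iff_not,
        List.mem_append, not_or]
      constructor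
      · intro hmem
        have hmem' : c + (n : Int) ∈ d.keys := by simpa [PySem.Dict.keys] using hmem
        have := hk _ hmem'
        omega
      · intro hmem
        simp only [Function.comp_def, List.mem_map, PySem.List.mem_pyRange_one] at hmem
        obtain ⟨x, ⟨hx1, hx2⟩, hx3⟩ := hmem
        omega
    have hstep : (PySem.Dict.mk (d.items ++
          (PySem.List.pyRange c (c + n) 1).map (fun x => (x, a)))).insert (c + n) a
        = PySem.Dict.mk (d.items ++
          (PySem.List.pyRange c (c + ((n : Int) + 1)) 1).map (fun x => (x, a))) := by
      apply PySem.Dict.ext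
      rw [PySem.Dict.items_insert_of_not_contains _ _ hnc]
      rw [show c + ((n : Int) + 1) = (c + n) + 1 from by ring,
        PySem.List.pyRange_one_succ_right (by omega)]
      simp
    rw [Prod.mk.injEq]
    exact ⟨hstep, by ring⟩

lemma b_fold (cnt : Int → Int) (hc : ∀ i, 0 ≤ cnt i) (rest : List Int) :
    ∀ (s c : Int) (d : PySem.Dict Int Int), (∀ x ∈ d.keys, x < c) →
      ∃ e : Int,
      (PySem.List.enumerate rest s).foldl
          (fun (st : PySem.Dict Int Int × Int) p =>
            (PySem.List.pyRange 0 (cnt p.1) 1).foldl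
              (fun st2 _ => (st2.1.insert st2.2 p.2, st2.2 + 1)) st)
          (d, c)
        = (PySem.Dict.mk (d.items ++ invSegs cnt rest s c), e) := by
  induction rest with
  | nil =>
    intro s c d hk
    exact ⟨c, by simp [invSegs, PySem.List.enumerate_nil]⟩
  | cons a t ih =>
    intro s c d hk
    rw [PySem.List.enumerate_cons]
    simp only [List.foldl_cons]
    have h0 : 0 ≤ cnt s := hc s
    rw [show PySem.List.pyRange 0 (cnt s) 1 = PySem.List.pyRange 0 (((cnt s).toNat : Nat) : Int) 1
      from by rw [Int.toNat_of_nonneg h0]]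
    rw [b_seg a (cnt s).toNat c d hk]
    rw [show (c + (((cnt s).toNat : Nat) : Int)) = c + cnt s from by rw [Int.toNat_of_nonneg h0]]
    obtain ⟨e, he⟩ := ih (s + 1) (c + cnt s)
      (PySem.Dict.mk (d.items ++ (PySem.List.pyRange c (c + cnt s) 1).map (fun x => (x, a))))
      (by
        intro x hx
        simp only [PySem.Dict.keys_mk, List.map_append, List.map_map, List.mem_append] at hx
        rcases hx with hx | hx
        · have hx' : x ∈ d.keys := by simpa [PySem.Dict.keys] using hx
          have := hk _ hx'
          omega
        · simp only [Function.comp_def, List.mem_map, PySem.List.mem_pyRange_one] at hx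
          obtain ⟨y, ⟨hy1, hy2⟩, hy3⟩ := hx
          omega)
    refine ⟨e, ?_⟩
    rw [he]
    rw [Prod.mk.injEq]
    refine ⟨?_, rfl⟩
    apply PySem.Dict.ext
    conv_rhs => rw [invSegs]
    simp [List.append_assoc]

lemma startA_nonneg (q r i : Int) (hq : 0 ≤ q) (hr : 0 ≤ r) (hi : 0 ≤ i) : 0 ≤ startA q r i := by
  unfold startA
  split_ifs with h
  · positivity
  · have h1 : 0 ≤ (i - r) * q := mul_nonneg (by omega) hq
    nlinarith

lemma startA_succ (q r s : Int) (hq : 0 ≤ q) (hr : 0 ≤ r) (hs : 0 ≤ s) :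
    startA q r (s + 1) = startA q r s + cntA q r s := by
  unfold startA cntA
  split_ifs with h1 h2 h2
  · ring
  · omega
  · have : r = s + 1 := by omega
    subst this
    ring
  · ring

lemma startA_le (q r k i : Int) (hq : 0 ≤ q) (hr : 0 ≤ r) (hrk : r ≤ k) (h0 : 0 ≤ i) (hi : i ≤ k) :
    startA q r i ≤ k * q + r := by
  unfold startA
  have hik : i * q ≤ k * q := mul_le_mul_of_nonneg_right hi hq
  split_ifs with h
  · nlinarith
  · nlinarith

lemma segs_eq (q r : Int) (hq : 0 ≤ q) (hr : 0 ≤ r) (t : List Int) :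
    ∀ (s : Int), 0 ≤ s →
      (PySem.List.enumerate t s).flatMap
          (fun p => (PySem.List.pyRange (1 + startA q r p.1) (1 + startA q r p.1 + cntA q r p.1) 1).map
            (fun c => (c, p.2)))
        = invSegs (fun i => q + (if i < r then 1 else 0)) t s (1 + startA q r s) := by
  induction t with
  | nil => intro s _; simp [invSegs]
  | cons a t ih =>
    intro s hs
    rw [PySem.List.enumerate_cons]
    simp only [List.flatMap_cons]
    have harg : (1 : Int) + startA q r (s + 1)
        = 1 + startA q r s + (q + if s < r then 1 else 0) := by
      rw [startA_succ q r s hq hr hs]; unfold cntA; ring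
    rw [ih (s + 1) (by omega), harg]
    conv_rhs => rw [invSegs]
    simp only [cntA]

lemma flat_ranges (q r k : Int) (hq : 0 ≤ q) (hr : 0 ≤ r) (hrk : r ≤ k) (t : List Int) :
    ∀ (s : Int), 0 ≤ s → s + (t.length : Int) = k →
      (PySem.List.enumerate t s).flatMap
          (fun p => PySem.List.pyRange (1 + startA q r p.1) (1 + startA q r p.1 + cntA q r p.1) 1)
        = PySem.List.pyRange (1 + startA q r s) (k * q + r + 1) 1 := by
  induction t with
  | nil =>
    intro s hs hk
    have hsk : s = k := by simpa using hk
    subst hsk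
    have hstart : startA q r s = s * q + r := by
      unfold startA
      rw [if_neg (by omega)]
      ring
    rw [PySem.List.pyRange_one_eq_nil (by omega)]
    simp [PySem.List.enumerate_nil]
  | cons a t ih =>
    intro s hs hk
    have hlen : (0 : Int) ≤ t.length := by positivity
    have hsk : s + 1 + (t.length : Int) = k := by
      push_cast [List.length_cons] at hk ⊢; omega
    have hs1k : s + 1 ≤ k := by omega
    rw [PySem.List.enumerate_cons]
    simp only [List.flatMap_cons]
    rw [ih (s + 1) (by omega) hsk]
    have hsucc : startA q r (s + 1) = startA q r s + cntA q r s :=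
      startA_succ q r s hq hr hs
    have hcnt : 0 ≤ cntA q r s := by unfold cntA; split_ifs <;> omega
    have hle : startA q r (s + 1) ≤ k * q + r :=
      startA_le q r k (s + 1) hq hr hrk (by omega) hs1k
    rw [show (1 : Int) + startA q r s + cntA q r s = 1 + startA q r (s + 1) by omega]
    exact (PySem.List.pyRange_one_append _ _ _ (by omega) (by omega)).symm

lemma trunc_eq_floor (N k : Int) (h0 : 0 ≤ N) (hk : 0 < k) :
    PySem.Int.truncdiv N k = PySem.Int.floordiv N k := by
  unfold PySem.Int.truncdiv PySem.Int.floordiv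
  rw [Int.tdiv_eq_ediv_of_nonneg h0, Int.fdiv_eq_ediv]
  simp [hk.le]


lemma seg_to_range (N q r k i : Int) (hq : 0 ≤ q) (hr : 0 ≤ r) (hrk : r ≤ k)
    (hN : k * q + r = N) (hi : 0 ≤ i) (hik : i + 1 ≤ k) :
    PySem.List.slice (PySem.List.pyRange 1 (N + 1) 1)
        (some (startA q r i)) (some (startA q r i + cntA q r i))
      = PySem.List.pyRange (1 + startA q r i) (1 + startA q r i + cntA q r i) 1 := by
  have h1 := startA_nonneg q r i hq hr hi
  have hc : 0 ≤ cntA q r i := by unfold cntA; split_ifs <;> omega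
  have h2 : startA q r i + cntA q r i ≤ N := by
    rw [← startA_succ q r i hq hr hi]
    calc startA q r (i + 1) ≤ k * q + r := startA_le q r k (i + 1) hq hr hrk (by omega) hik
      _ = N := hN
  rw [show (1 : Int) + startA q r i + cntA q r i = 1 + (startA q r i + cntA q r i) from by ring]
  exact slice_classes N _ _ h1 (by omega) h2

lemma startA_zero (q r : Int) (hr : 0 ≤ r) : startA q r 0 = 0 := by
  unfold startA
  split_ifs with h
  · ring
  · have : r = 0 := by omega
    subst this
    ring

lemma a_side (ages : List Int) (N q r : Int)
    (hq : 0 ≤ q) (hr : 0 ≤ r) (hrk : r ≤ (ages.length : Int))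
    (hN : (ages.length : Int) * q + r = N) :
    (((PySem.List.enumerate ages 0).map (fun p =>
        (p.2, PySem.List.pyRange (1 + startA q r p.1) (1 + startA q r p.1 + cntA q r p.1) 1))).foldl
      (fun inv pr => pr.2.foldl (fun i2 c => i2.insert c pr.1) inv)
      (PySem.Dict.empty : PySem.Dict Int Int)).items
    = invSegs (fun i => q + if i < r then 1 else 0) ages 0 1 := by
  have hflat : ((PySem.List.enumerate ages 0).map (fun p =>
        (p.2, PySem.List.pyRange (1 + startA q r p.1) (1 + startA q r p.1 + cntA q r p.1) 1))).flatMap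
        (fun x => x.2) = PySem.List.pyRange 1 (N + 1) 1 := by
    rw [List.flatMap_map]
    have h := flat_ranges q r (ages.length : Int) hq hr hrk ages 0 le_rfl (by simp)
    rw [hN] at h
    rw [startA_zero q r hr] at h
    simpa using h
  rw [inv_fold _ PySem.Dict.empty (by simp) (by simp) (by rw [hflat]; exact PySem.List.nodup_pyRange_one _ _)]
  have h := segs_eq q r hq hr ages 0 le_rfl
  rw [startA_zero q r hr] at h
  rw [List.flatMap_map]
  simpa using h

lemma core (ages : List Int) (hnd : ages.Nodup) (hlen : 0 < ages.length) (N : Int)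
    (hkN : (ages.length : Int) ≤ N) :
    (let classes := PySem.List.pyRange 1 (N + 1) 1
     let N_age_bracket : Int := ages.length
     let classes_per_age_bracket := PySem.Int.truncdiv N N_age_bracket
     let age_bracket_map : PySem.Dict Int (List Int) :=
        ages.foldl (fun d i => d.insert i []) PySem.Dict.empty
     let m : PySem.Dict Int (List Int) :=
        if PySem.Int.mod N N_age_bracket = 0 then
          (PySem.List.enumerate ages 0).foldl
            (fun d p => d.insert p.2 (PySem.List.slice classes
                (some (p.1 * classes_per_age_bracket))
                (some (p.1 * classes_per_age_bracket + classes_per_age_bracket)))) age_bracket_map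
        else
          let leftover_classes := PySem.Int.mod N N_age_bracket
          let cpb := classes_per_age_bracket + 1
          (PySem.List.enumerate ages 0).foldl
            (fun d p =>
              if p.1 < leftover_classes then
                d.insert p.2 (PySem.List.slice classes (some (p.1 * cpb)) (some (p.1 * cpb + cpb)))
              else
                d.insert p.2 (PySem.List.slice classes
                  (some (leftover_classes * cpb + (p.1 - leftover_classes) * (cpb - 1)))
                  (some (leftover_classes * cpb + (p.1 - leftover_classes) * (cpb - 1) + cpb - 1))))
            age_bracket_map
     (m.items.foldl
        (fun inv pr => pr.2.foldl (fun i2 c => i2.insert c pr.1) inv)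
        (PySem.Dict.empty : PySem.Dict Int Int)).items)
    = ((PySem.List.enumerate ages 0).foldl
        (fun (st : PySem.Dict Int Int × Int) p =>
          (PySem.List.pyRange 0 (PySem.Int.floordiv N ages.length +
              if p.1 < PySem.Int.mod N ages.length then 1 else 0) 1).foldl
            (fun st2 _ => (st2.1.insert st2.2 p.2, st2.2 + 1)) st)
        (PySem.Dict.empty, 1)).1.items := by
  dsimp only
  have hk0 : (0 : Int) < (ages.length : Int) := by exact_mod_cast hlen
  set k : Int := (ages.length : Int) with hkdef
  set q : Int := PySem.Int.floordiv N k with hqdef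
  set r : Int := PySem.Int.mod N k with hrdef
  have hNqr : q * k + r = N := PySem.Int.floordiv_mul_add_mod N k
  have hrb : 0 ≤ r ∧ r < k := by
    rw [hrdef, PySem.Int.mod_eq_emod_of_pos hk0]
    exact ⟨Int.emod_nonneg N (by omega), Int.emod_lt_of_pos N hk0⟩
  have hq0 : 0 ≤ q := by nlinarith [hrb.1, hrb.2]
  have hN' : k * q + r = N := by linarith [hNqr, mul_comm q k]
  have htr : PySem.Int.truncdiv N k = q := by
    rw [hqdef]
    exact trunc_eq_floor N k (by omega) hk0
  rw [htr]
  obtain ⟨e, he⟩ := b_fold (fun i => q + if i < r then 1 else 0)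
    (fun i => by dsimp only; split_ifs <;> omega) ages 0 1 PySem.Dict.empty
    (by intro x hx; simp [PySem.Dict.keys, PySem.Dict.empty] at hx)
  rw [he]
  have hBside : (PySem.Dict.mk ((PySem.Dict.empty : PySem.Dict Int Int).items ++
      invSegs (fun i => q + if i < r then 1 else 0) ages 0 1)).items
      = invSegs (fun i => q + if i < r then 1 else 0) ages 0 1 := by
    simp [PySem.Dict.empty]
  rw [hBside]
  by_cases hmod : r = 0
  · rw [if_pos hmod]
    rw [fwd ages hnd (fun i => PySem.List.slice (PySem.List.pyRange 1 (N + 1) 1)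
      (some (i * q)) (some (i * q + q)))]
    have hseg : (PySem.List.enumerate ages 0).map (fun p =>
        (p.2, PySem.List.slice (PySem.List.pyRange 1 (N + 1) 1)
          (some (p.1 * q)) (some (p.1 * q + q))))
        = (PySem.List.enumerate ages 0).map (fun p =>
        (p.2, PySem.List.pyRange (1 + startA q r p.1) (1 + startA q r p.1 + cntA q r p.1) 1)) := by
      apply List.map_congr_left
      intro p hp
      obtain ⟨j, hj, rfl⟩ := (PySem.List.mem_enumerate_iff _ _ _).mp hp
      have hj0 : (0 : Int) ≤ 0 + (j : Int) := by positivity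
      have hjk : (0 : Int) + (j : Int) + 1 ≤ k := by rw [hkdef]; omega
      have hsA : startA q r (0 + (j : Int)) = (0 + (j : Int)) * q := by
        rw [hmod]; unfold startA; rw [if_neg (by omega)]; ring
      have hcA : cntA q r (0 + (j : Int)) = q := by
        rw [hmod]; unfold cntA; rw [if_neg (by omega)]; ring
      have := seg_to_range N q r k (0 + (j : Int)) hq0 hrb.1 (by omega) hN' hj0 hjk
      rw [hsA, hcA] at this
      simp only []
      rw [this]
      rw [hsA, hcA]
    rw [hseg]
    exact a_side ages N q r hq0 hrb.1 (by omega) hN'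
  · rw [if_neg hmod]
    have hcongr : ∀ (d : PySem.Dict Int (List Int)) (p : Int × Int), p ∈ PySem.List.enumerate ages 0 →
        (if p.1 < r then
          d.insert p.2 (PySem.List.slice (PySem.List.pyRange 1 (N + 1) 1)
            (some (p.1 * (q + 1))) (some (p.1 * (q + 1) + (q + 1))))
        else
          d.insert p.2 (PySem.List.slice (PySem.List.pyRange 1 (N + 1) 1)
            (some (r * (q + 1) + (p.1 - r) * (q + 1 - 1)))
            (some (r * (q + 1) + (p.1 - r) * (q + 1 - 1) + (q + 1) - 1))))
        = d.insert p.2 (PySem.List.pyRange (1 + startA q r p.1)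
            (1 + startA q r p.1 + cntA q r p.1) 1) := by
      intro d p hp
      obtain ⟨j, hj, rfl⟩ := (PySem.List.mem_enumerate_iff _ _ _).mp hp
      have hj0 : (0 : Int) ≤ 0 + (j : Int) := by positivity
      have hjk : (0 : Int) + (j : Int) + 1 ≤ k := by rw [hkdef]; omega
      have hrange := seg_to_range N q r k (0 + (j : Int)) hq0 hrb.1 (by omega) hN' hj0 hjk
      by_cases hlt : (0 : Int) + (j : Int) < r
      · rw [if_pos hlt]
        have hsA : startA q r (0 + (j : Int)) = (0 + (j : Int)) * (q + 1) := by
          unfold startA; rw [if_pos hlt]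
        have hcA : cntA q r (0 + (j : Int)) = q + 1 := by
          unfold cntA; rw [if_pos hlt]
        rw [hsA, hcA] at hrange
        rw [show (0 + (j : Int)) * (q + 1) + (q + 1) = 0 + (j : Int) * (q + 1) + (q + 1) from by ring,
          show (0 + (j : Int)) * (q + 1) = 0 + (j : Int) * (q + 1) from by ring] at hrange
        rw [show ((0 : Int) + (j : Int)) * (q + 1) = 0 + (j : Int) * (q + 1) from by ring]
        rw [hrange, hsA, hcA]
        rw [show (0 + (j : Int)) * (q + 1) = 0 + (j : Int) * (q + 1) from by ring]
      · rw [if_neg hlt]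
        have hsA : startA q r (0 + (j : Int)) = r * (q + 1) + ((0 + (j : Int)) - r) * (q + 1 - 1) := by
          unfold startA; rw [if_neg hlt]; ring
        have hcA : cntA q r (0 + (j : Int)) = q := by
          unfold cntA; rw [if_neg hlt]; ring
        rw [show r * (q + 1) + ((0 + (j : Int)) - r) * (q + 1 - 1) + (q + 1) - 1
            = (r * (q + 1) + ((0 + (j : Int)) - r) * (q + 1 - 1)) + q from by ring]
        rw [show startA q r (0 + (j : Int)) + cntA q r (0 + (j : Int))
            = (r * (q + 1) + ((0 + (j : Int)) - r) * (q + 1 - 1)) + q from by rw [hsA, hcA]] at hrange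
        rw [hsA] at hrange
        rw [hrange, hsA, hcA]
    rw [PySem.List.foldl_congr_mem
      (l := PySem.List.enumerate ages 0)
      (init := ages.foldl (fun d i => d.insert i ([] : List Int)) PySem.Dict.empty)
      (f := fun d p =>
        if p.1 < r then
          d.insert p.2 (PySem.List.slice (PySem.List.pyRange 1 (N + 1) 1)
            (some (p.1 * (q + 1))) (some (p.1 * (q + 1) + (q + 1))))
        else
          d.insert p.2 (PySem.List.slice (PySem.List.pyRange 1 (N + 1) 1)
            (some (r * (q + 1) + (p.1 - r) * (q + 1 - 1)))
            (some (r * (q + 1) + (p.1 - r) * (q + 1 - 1) + (q + 1) - 1))))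
      (g := fun d p => d.insert p.2 (PySem.List.pyRange (1 + startA q r p.1)
        (1 + startA q r p.1 + cntA q r p.1) 1))
      hcongr]
    rw [fwd ages hnd (fun i => PySem.List.pyRange (1 + startA q r i) (1 + startA q r i + cntA q r i) 1)]
    exact a_side ages N q r hq0 hrb.1 (by omega) hN'


-- ===== VERDICT (by name: the statement is the Claim_ definition above) =====
lemma main_case (ages : List Int) (hnd : ages.Nodup) (hlen : 0 < ages.length) (N : Int)
    (hkN : (ages.length : Int) ≤ N) (st : String)
    (hA : get_age_bracket st = some ages) :
    get_age_distribution st N = get_age_distribution_alt st N := by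
  simp only [get_age_distribution, get_age_distribution_alt, hA]
  rw [if_pos hkN, if_pos hkN]
  exact core ages hnd hlen N hkN

-- ===== VERDICT (by name: the statement is the Claim_ definition above) =====
theorem get_age_distribution_spec : Claim_equal_get_age_distribution := by
  intro st N _ hpre
  unfold Spec_get_age_distribution
  rcases hpre with ⟨hmem, hN⟩ | ⟨hmem, hN⟩ <;> fin_cases hmem <;>
    exact main_case _ (by decide) (by decide) N (by simp; omega) _ rfl
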